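-- pv_equiv track=rewrite | github.com/mangodm-web/dsa-playground | 프로그래머스/2/42577. 전화번호 목록/전화번호 목록.py | solution
-- ===== SOURCE A (Python) =====
-- from typing import List
--
-- def solution(phone_book: List[str]) -> bool:
--     phone_hash = {}
--
--     for number in phone_book:
--         phone_hash[number] = True
--
--     for number in phone_book:
--         temp = ""
--         for char in number[:-1]:
--             temp += char
--             if temp in phone_hash:
--                 return False
--
--     return True
-- ===== SOURCE B (Python) =====
-- from typing import List
--
-- def solution(phone_book: List[str]) -> bool:
--     s = sorted(phone_book)
--     for x, y in zip(s, s[1:]):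
--         if x and len(x) < len(y) and y.startswith(x):
--             return False
--     return True
-- ===== Notes on version B (the rewrite author's own statement) =====
-- stated objective: alternative
-- what changed: Replaces the hash set plus per-string enumeration of every proper prefix by a sort followed by a single adjacent-pair scan: in a sorted list any nonempty proper prefix relation shows up at an adjacent pair.
import Mathlib
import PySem

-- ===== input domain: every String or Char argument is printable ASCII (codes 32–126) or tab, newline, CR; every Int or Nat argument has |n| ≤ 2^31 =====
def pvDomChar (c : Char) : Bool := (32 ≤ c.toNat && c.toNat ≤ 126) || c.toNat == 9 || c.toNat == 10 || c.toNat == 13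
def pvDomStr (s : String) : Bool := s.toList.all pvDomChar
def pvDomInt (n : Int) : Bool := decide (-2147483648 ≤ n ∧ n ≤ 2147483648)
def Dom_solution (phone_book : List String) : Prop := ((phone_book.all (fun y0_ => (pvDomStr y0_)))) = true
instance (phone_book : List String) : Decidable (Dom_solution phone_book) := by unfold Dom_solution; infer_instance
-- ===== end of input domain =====

-- B replaces A's hash set + enumeration of every proper prefix of every number by a
-- different algorithm: sort, then a single adjacent-pair scan (return value only; no mutation).

-- ===== PORT A =====
-- Python strings are modelled as List Char (per PySem); A's dict is keyed accordingly.
-- 'for number in phone_book: phone_hash[number] = True'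
def solutionHash (phone_book : List String) : PySem.Dict (List Char) Bool :=
  phone_book.foldl (fun d number => d.insert number.toList true) PySem.Dict.empty

-- inner loop: 'for char in number[:-1]: temp += char; if temp in phone_hash: return False'
-- (returns true iff the 'return False' fires)
def solutionInner (h : PySem.Dict (List Char) Bool) (temp : List Char) : List Char → Bool
  | [] => false
  | c :: cs =>
      if h.contains (temp ++ [c]) then true else solutionInner h (temp ++ [c]) cs

-- outer loop with the early 'return False'
def solutionOuter (h : PySem.Dict (List Char) Bool) : List String → Bool
  | [] => true
  | number :: rest =>
      if solutionInner h [] (PySem.Str.slice number none (some (-1))).toList then false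
      else solutionOuter h rest

def solution (phone_book : List String) : Bool :=
  solutionOuter (solutionHash phone_book) phone_book

-- ===== PORT B =====
-- 'for x, y in zip(s, s[1:]): if x and len(x) < len(y) and y.startswith(x): return False'
def solutionAdjLoop : List (String × String) → Bool
  | [] => true
  | (x, y) :: rest =>
      if !(x == "") && decide (PySem.Str.len x < PySem.Str.len y) && PySem.Str.startswith y x
      then false else solutionAdjLoop rest

def solution_alt (phone_book : List String) : Bool :=
  let s := PySem.List.sorted phone_book (fun x => x)
  solutionAdjLoop (s.zip (PySem.List.slice s (some 1) none))

-- ===== PRECONDITION & SPEC =====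
def Spec_solution (phone_book : List String) (out : Bool) : Prop := out = solution_alt phone_book
instance (phone_book : List String) (out : Bool) : Decidable (Spec_solution phone_book out) := by unfold Spec_solution; infer_instance

-- ===== CLAIM (what is proved, stated in full; the proofs are below) =====
def Claim_equal_solution : Prop := ∀ (phone_book : List String), Dom_solution phone_book → Spec_solution phone_book (solution phone_book)

-- ===== LEMMAS AND PROOFS =====

-- the offence both programs detect: a is a nonempty proper prefix of b
def PredP (a b : String) : Prop :=
  a ≠ "" ∧ a.toList.length < b.toList.length ∧ a.toList <+: b.toList

theorem predP_iff_bool (x y : String) :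
    (!(x == "") && decide (PySem.Str.len x < PySem.Str.len y) && PySem.Str.startswith y x) = true
      ↔ PredP x y := by
  simp only [Bool.and_eq_true, Bool.not_eq_true', beq_eq_false_iff_ne, decide_eq_true_eq,
    PySem.Str.startswith_eq, PySem.Str.len_eq, Nat.cast_lt, PySem.Chars.startswith_iff]
  unfold PredP
  tauto

-- ==== A-side characterisation ====

-- the hash built by A contains exactly the phone-book entries
theorem solutionHash_contains_aux (l : List String) (d : PySem.Dict (List Char) Bool)
    (k : List Char) :
    (l.foldl (fun d number => d.insert number.toList true) d).contains k = true ↔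
      d.contains k = true ∨ ∃ a ∈ l, a.toList = k := by
  induction l generalizing d with
  | nil => simp
  | cons x xs ih =>
      simp only [List.foldl_cons, ih, PySem.Dict.contains_insert, Bool.or_eq_true, beq_iff_eq,
        List.mem_cons]
      constructor
      · rintro (⟨h | h⟩ | ⟨a, ha, rfl⟩)
        · exact Or.inr ⟨x, Or.inl rfl, h.symm⟩
        · exact Or.inl h
        · exact Or.inr ⟨a, Or.inr ha, rfl⟩
      · rintro (h | ⟨a, (rfl | ha), rfl⟩)
        · exact Or.inl (Or.inr h)
        · exact Or.inl (Or.inl rfl)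
        · exact Or.inr ⟨a, ha, rfl⟩

theorem solutionHash_contains (phone_book : List String) (k : List Char) :
    (solutionHash phone_book).contains k = true ↔ ∃ a ∈ phone_book, a.toList = k := by
  rw [solutionHash, solutionHash_contains_aux]
  simp

-- the inner loop fires iff some nonempty prefix extension of temp is in the hash
theorem solutionInner_spec (h : PySem.Dict (List Char) Bool) (cs temp : List Char) :
    solutionInner h temp cs = true ↔
      ∃ p, p ≠ [] ∧ p <+: cs ∧ h.contains (temp ++ p) = true := by
  induction cs generalizing temp with
  | nil =>
      simp only [solutionInner, List.prefix_nil]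
      constructor
      · intro hf; cases hf
      · rintro ⟨p, hp, rfl, _⟩; exact absurd rfl hp
  | cons c cs ih =>
      simp only [solutionInner]
      split
      · rename_i hc
        simp only [true_iff]
        exact ⟨[c], by simp, ⟨cs, rfl⟩, hc⟩
      · rename_i hc
        rw [ih]
        constructor
        · rintro ⟨p', hp', hpre, hcont⟩
          exact ⟨c :: p', by simp, by simpa [List.cons_prefix_cons] using hpre,
            by simpa [List.append_assoc] using hcont⟩
        · rintro ⟨p, hp, hpre, hcont⟩
          cases p with
          | nil => exact absurd rfl hp
          | cons a p' =>
              obtain ⟨rfl, hpre'⟩ := List.cons_prefix_cons.mp hpre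
              cases p' with
              | nil => exact absurd hcont (by simp [hc])
              | cons b p'' =>
                  exact ⟨b :: p'', by simp, hpre', by simpa [List.append_assoc] using hcont⟩

-- the outer loop returns true iff the inner loop never fires
theorem solutionOuter_spec (h : PySem.Dict (List Char) Bool) (l : List String) :
    solutionOuter h l = true ↔
      ∀ b ∈ l, solutionInner h [] (PySem.Str.slice b none (some (-1))).toList = false := by
  induction l with
  | nil => simp [solutionOuter]
  | cons x xs ih =>
      simp only [solutionOuter]
      split
      · rename_i hx
        simp only [List.mem_cons]
        constructor
        · intro h'; cases h'
        · intro hall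
          have hfx := hall x (Or.inl rfl)
          rw [hfx] at hx; cases hx
      · rename_i hx
        rw [ih]
        constructor
        · intro hall b hb
          rcases List.mem_cons.mp hb with rfl | hb
          · simpa using hx
          · exact hall b hb
        · intro hall b hb
          exact hall b (List.mem_cons.mpr (Or.inr hb))

-- nonempty prefixes of dropLast = nonempty proper prefixes
theorem prefix_dropLast_iff (p l : List Char) (hp : p ≠ []) :
    p <+: l.dropLast ↔ p.length < l.length ∧ p <+: l := by
  rw [List.dropLast_eq_take, List.prefix_take_iff]
  cases l with
  | nil => simp [List.prefix_nil]; intro h; exact absurd h hp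
  | cons x xs =>
      constructor
      · rintro ⟨h1, h2⟩; refine ⟨?_, h1⟩; simp at h2 ⊢; omega
      · rintro ⟨h1, h2⟩; refine ⟨h2, ?_⟩; simp at h1 ⊢; omega

-- A's inner loop on number b fires iff some phone-book entry is a nonempty proper prefix of b
theorem solutionInner_fires (pb : List String) (b : String) :
    solutionInner (solutionHash pb) [] (PySem.Str.slice b none (some (-1))).toList = true ↔
      ∃ a ∈ pb, PredP a b := by
  rw [solutionInner_spec]
  constructor
  · rintro ⟨p, hp, hpre, hcont⟩
    rw [List.nil_append, solutionHash_contains] at hcont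
    obtain ⟨a, ha, rfl⟩ := hcont
    rw [PySem.Str.slice_to_neg_one, prefix_dropLast_iff _ _ hp] at hpre
    exact ⟨a, ha, fun he => hp (String.toList_eq_nil_iff.mpr he), hpre.1, hpre.2⟩
  · rintro ⟨a, ha, hne, hlen, hpre⟩
    have hane : a.toList ≠ [] := fun h => hne (String.toList_eq_nil_iff.mp h)
    refine ⟨a.toList, hane, ?_, ?_⟩
    · rw [PySem.Str.slice_to_neg_one, prefix_dropLast_iff _ _ hane]
      exact ⟨hlen, hpre⟩
    · rw [List.nil_append, solutionHash_contains]
      exact ⟨a, ha, rfl⟩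

-- ==== B-side characterisation ====

-- B's adjacent-pair loop over zip(s, s[1:]) checks exactly the adjacent pairs of s
theorem solutionAdjLoop_spec (l : List String) :
    solutionAdjLoop (l.zip l.tail) = true ↔ List.IsChain (fun x y => ¬ PredP x y) l := by
  induction l with
  | nil => simp [solutionAdjLoop]
  | cons x t ih =>
      cases t with
      | nil => simp [solutionAdjLoop]
      | cons y r =>
          show solutionAdjLoop ((x, y) :: (y :: r).zip ((y :: r).tail)) = true ↔ _
          rw [List.isChain_cons_cons, ← ih]
          simp only [solutionAdjLoop]
          split
          · rename_i hcond
            constructor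
            · intro h; cases h
            · rintro ⟨hnp, _⟩; exact absurd (predP_iff_bool x y |>.mp hcond) hnp
          · rename_i hcond
            constructor
            · intro hrest
              exact ⟨fun hp => hcond (predP_iff_bool x y |>.mpr hp), hrest⟩
            · intro h'
              exact h'.2

-- ==== order lemmas linking "some pair offends" to "some ADJACENT pair of the sorted list offends" ====

-- lex order on List Char: u ≤ v ≤ w and u a prefix of w force u to be a prefix of v
theorem prefix_of_between (u v w : List Char) (huv : u < v ∨ u = v) (hvw : v < w ∨ v = w)
    (hp : u <+: w) : u <+: v := by
  induction u generalizing v w with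
  | nil => exact List.nil_prefix
  | cons c u' ih =>
      obtain ⟨w0, rfl⟩ := hp
      cases v with
      | nil =>
          rcases huv with h | h
          · cases h' : (c :: u') <;> simp [h'] at h
          · simp at h
      | cons d v' =>
          rcases huv with h1 | h1
          · rcases List.cons_lt_cons_iff.mp h1 with h2 | ⟨rfl, h2⟩
            · exfalso
              rcases hvw with h3 | h3
              · rcases List.cons_lt_cons_iff.mp h3 with h4 | ⟨h4, _⟩
                · exact absurd (h2.trans h4) (lt_irrefl c)
                · exact absurd (h4 ▸ h2) (lt_irrefl c)
              · have : d = c := by simpa using congrArg (fun l => l.head?) h3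
                exact absurd (this ▸ h2) (lt_irrefl c)
            · have hvw' : v' < u' ++ w0 ∨ v' = u' ++ w0 := by
                rcases hvw with h3 | h3
                · rcases List.cons_lt_cons_iff.mp h3 with h4 | ⟨_, h4⟩
                  · exact absurd h4 (lt_irrefl c)
                  · exact Or.inl h4
                · exact Or.inr (by simpa using congrArg List.tail h3)
              exact List.cons_prefix_cons.mpr
                ⟨rfl, ih v' (u' ++ w0) (Or.inl h2) hvw' (List.prefix_append u' w0)⟩
          · exact h1 ▸ List.prefix_refl _

theorem prefix_lt_or_eq (u v : List Char) (h : u <+: v) : u < v ∨ u = v := by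
  induction u generalizing v with
  | nil => cases v with
           | nil => exact Or.inr rfl
           | cons d v' => exact Or.inl (List.nil_lt_cons d v')
  | cons c u' ih =>
      cases v with
      | nil => exact absurd (List.prefix_nil.mp h) (by simp)
      | cons d v' =>
        obtain ⟨rfl, h'⟩ := List.cons_prefix_cons.mp h
        rcases ih _ h' with h2 | rfl
        · exact Or.inl (List.cons_lt_cons_iff.mpr (Or.inr ⟨rfl, h2⟩))
        · exact Or.inr rfl

theorem str_le_toList (x y : String) (h : x ≤ y) : x.toList < y.toList ∨ x.toList = y.toList := by
  rcases Std.le_iff_lt_or_eq.mp h with h | h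
  · exact Or.inl (String.lt_iff_toList_lt.mp h)
  · exact Or.inr (congrArg String.toList h)

-- on a (≤)-sorted list, no offending adjacent pair means no offending pair at all
theorem chain_imp_forall (s : List String) (hs : s.Pairwise (· ≤ ·))
    (hc : List.IsChain (fun x y => ¬ PredP x y) s) :
    ∀ a ∈ s, ∀ b ∈ s, ¬ PredP a b := by
  induction s with
  | nil => intro a ha; cases ha
  | cons x t ih =>
      rw [List.pairwise_cons] at hs
      obtain ⟨hx, ht⟩ := hs
      have ihp := ih ht hc.tail
      intro a ha b hb hP
      rcases List.mem_cons.mp ha with rfl | ha' <;> rcases List.mem_cons.mp hb with rfl | hb'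
      · exact lt_irrefl _ hP.2.1
      · cases t with
        | nil => cases hb'
        | cons y t' =>
            have hxy : a ≤ y := hx y List.mem_cons_self
            have hyb : y.toList < b.toList ∨ y.toList = b.toList := by
              rcases List.mem_cons.mp hb' with rfl | hb''
              · exact Or.inr rfl
              · exact str_le_toList _ _ ((List.pairwise_cons.mp ht).1 b hb'')
            have hpre : a.toList <+: y.toList :=
              prefix_of_between _ _ _ (str_le_toList _ _ hxy) hyb hP.2.2
            by_cases hlen : a.toList.length < y.toList.length
            · exact (List.isChain_cons_cons.mp hc).1 ⟨hP.1, hlen, hpre⟩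
            · have hay : a = y := String.toList_inj.mp (hpre.eq_of_length_le (by omega))
              exact ihp y List.mem_cons_self b hb'
                ⟨hay ▸ hP.1, by rw [← hay]; exact hP.2.1, by rw [← hay]; exact hP.2.2⟩
      · have hba : b ≤ a := hx a ha'
        rcases prefix_lt_or_eq _ _ hP.2.2 with h1 | h1
        · rcases str_le_toList _ _ hba with h2 | h2
          · exact absurd (h1.trans h2) (lt_irrefl _)
          · rw [h2] at h1; exact absurd h1 (lt_irrefl _)
        · exact absurd (h1 ▸ hP.2.1) (lt_irrefl _)
      · exact ihp a ha' b hb' hP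

-- ===== VERDICT (by name: the statement is the Claim_ definition above) =====
theorem solution_spec : Claim_equal_solution := by
  intro pb _
  show solution pb = solution_alt pb
  rw [Bool.eq_iff_iff]
  have hA : solution pb = true ↔ ∀ a ∈ pb, ∀ b ∈ pb, ¬ PredP a b := by
    show solutionOuter (solutionHash pb) pb = true ↔ _
    rw [solutionOuter_spec]
    constructor
    · intro hall a ha b hb hP
      have h1 := hall b hb
      rw [Bool.eq_false_iff, Ne, solutionInner_fires] at h1
      exact h1 ⟨a, ha, hP⟩
    · intro hall b hb
      rw [Bool.eq_false_iff, Ne, solutionInner_fires]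
      rintro ⟨a, ha, hP⟩
      exact hall a ha b hb hP
  have hB : solution_alt pb = true ↔
      List.IsChain (fun x y => ¬ PredP x y) (PySem.List.sorted pb (fun x => x)) := by
    show solutionAdjLoop _ = true ↔ _
    rw [PySem.List.slice_from_one]
    exact solutionAdjLoop_spec _
  rw [hA, hB]
  have hmem : ∀ x : String, x ∈ PySem.List.sorted pb (fun x => x) ↔ x ∈ pb :=
    fun x => PySem.List.mem_sorted pb (fun x => x) false x
  constructor
  · intro hall
    refine (List.pairwise_of_forall_mem_list ?_).isChain
    intro a ha b hb
    exact hall a ((hmem a).mp ha) b ((hmem b).mp hb)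
  · intro hc a ha b hb
    exact chain_imp_forall _ (PySem.List.sorted_pairwise pb (fun x => x)) hc
      a ((hmem a).mpr ha) b ((hmem b).mpr hb)
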